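-- pv_equiv track=rewrite | github.com/foxxiee04/Cab-Booking-System-Project | scripts/build-foxgo-diagram-set.py | activity_mermaid_source
-- ===== SOURCE A (Python) =====
-- COMMON_CLASSES = """
-- classDef user fill:#dbeafe,stroke:#60a5fa,color:#0f172a,stroke-width:1.5px;
-- classDef service fill:#ccfbf1,stroke:#14b8a6,color:#0f172a,stroke-width:1.5px;
-- classDef data fill:#dcfce7,stroke:#22c55e,color:#0f172a,stroke-width:1.5px;
-- classDef ai fill:#fef3c7,stroke:#f59e0b,color:#0f172a,stroke-width:1.5px;
-- classDef infra fill:#e0e7ff,stroke:#818cf8,color:#0f172a,stroke-width:1.5px;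
-- classDef external fill:#ffedd5,stroke:#fb923c,color:#0f172a,stroke-width:1.5px;
-- classDef risk fill:#fee2e2,stroke:#ef4444,color:#0f172a,stroke-width:1.5px;
-- classDef ok fill:#bbf7d0,stroke:#22c55e,color:#0f172a,stroke-width:1.5px;
-- classDef pattern fill:#f5d0fe,stroke:#d946ef,color:#0f172a,stroke-width:1.5px;
-- classDef security fill:#dbeafe,stroke:#2563eb,color:#0f172a,stroke-width:1.5px;
-- """
--
-- def with_classes(source: str) -> str:
--     return source.strip() + "\n" + COMMON_CLASSES.strip() + "\n"
--
-- def activity_mermaid_source(title: str, lanes: tuple[str, str], nodes: list[tuple[int, str, str]]) -> str: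
--     class_for_kind = {
--         "start": "user",
--         "end": "ok",
--         "diamond": "infra",
--         "rect": "service",
--     }
--     lines = ["flowchart LR"]
--     for lane_index, lane_name in enumerate(lanes):
--         node_ids = [f"N{i}" for i, node in enumerate(nodes) if node[0] == lane_index]
--         lines.append(f'  subgraph L{lane_index}["{lane_name}"]')
--         lines.append("    direction TB")
--         for node_id in node_ids:
--             idx = int(node_id[1:])
--             _, kind, label = nodes[idx]
--             css = class_for_kind.get(kind, "service")
--             if kind in {"start", "end"}:
--                 lines.append(f'    {node_id}(["{label}"]):::{css}')
--             elif kind == "diamond":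
--                 lines.append(f'    {node_id}{{"{label}"}}:::{css}')
--             else:
--                 lines.append(f'    {node_id}["{label}"]:::{css}')
--         lines.append("  end")
--     for idx in range(len(nodes) - 1):
--         lines.append(f"  N{idx} --> N{idx + 1}")
--     return with_classes("\n".join(lines))
-- ===== SOURCE B (Python) =====
-- COMMON_CLASSES = """
-- classDef user fill:#dbeafe,stroke:#60a5fa,color:#0f172a,stroke-width:1.5px;
-- classDef service fill:#ccfbf1,stroke:#14b8a6,color:#0f172a,stroke-width:1.5px;
-- classDef data fill:#dcfce7,stroke:#22c55e,color:#0f172a,stroke-width:1.5px;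
-- classDef ai fill:#fef3c7,stroke:#f59e0b,color:#0f172a,stroke-width:1.5px;
-- classDef infra fill:#e0e7ff,stroke:#818cf8,color:#0f172a,stroke-width:1.5px;
-- classDef external fill:#ffedd5,stroke:#fb923c,color:#0f172a,stroke-width:1.5px;
-- classDef risk fill:#fee2e2,stroke:#ef4444,color:#0f172a,stroke-width:1.5px;
-- classDef ok fill:#bbf7d0,stroke:#22c55e,color:#0f172a,stroke-width:1.5px;
-- classDef pattern fill:#f5d0fe,stroke:#d946ef,color:#0f172a,stroke-width:1.5px;
-- classDef security fill:#dbeafe,stroke:#2563eb,color:#0f172a,stroke-width:1.5px;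
-- """
--
--
-- def with_classes(source: str) -> str:
--     return source.strip() + "\n" + COMMON_CLASSES.strip() + "\n"
--
--
-- def activity_mermaid_source(title: str, lanes: tuple[str, str], nodes: list[tuple[int, str, str]]) -> str:
--     # one pass over nodes: bucket each node's fully formatted line under its lane
--     shape_for_kind = {
--         "start": ('(["', '"]):::user'),
--         "end": ('(["', '"]):::ok'),
--         "diamond": ('{"', '"}:::infra'),
--         "rect": ('["', '"]:::service'),
--     }
--     buckets = {}
--     for i, (lane, kind, label) in enumerate(nodes):
--         pre, post = shape_for_kind.get(kind, ('["', '"]:::service'))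
--         buckets.setdefault(lane, []).append(f"    N{i}{pre}{label}{post}")
--     parts = ["flowchart LR"]
--     for lane_index, lane_name in enumerate(lanes):
--         parts.append(f'  subgraph L{lane_index}["{lane_name}"]')
--         parts.append("    direction TB")
--         parts.extend(buckets.get(lane_index, []))
--         parts.append("  end")
--     parts.extend(f"  N{j} --> N{j + 1}" for j in range(len(nodes) - 1))
--     return with_classes("\n".join(parts))
-- ===== Notes on version B (the rewrite author's own statement) =====
-- stated objective: alternative
-- what changed: B makes one bucketing pass over nodes that formats each node line immediately and groups it under its lane key in a dict, then emits the two lane subgraphs from the pre-built buckets, replacing A's per-lane rescans of all nodes and its 'N<i>' string round-trip (build id string, reparse with int(), re-index nodes).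
import Mathlib
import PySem

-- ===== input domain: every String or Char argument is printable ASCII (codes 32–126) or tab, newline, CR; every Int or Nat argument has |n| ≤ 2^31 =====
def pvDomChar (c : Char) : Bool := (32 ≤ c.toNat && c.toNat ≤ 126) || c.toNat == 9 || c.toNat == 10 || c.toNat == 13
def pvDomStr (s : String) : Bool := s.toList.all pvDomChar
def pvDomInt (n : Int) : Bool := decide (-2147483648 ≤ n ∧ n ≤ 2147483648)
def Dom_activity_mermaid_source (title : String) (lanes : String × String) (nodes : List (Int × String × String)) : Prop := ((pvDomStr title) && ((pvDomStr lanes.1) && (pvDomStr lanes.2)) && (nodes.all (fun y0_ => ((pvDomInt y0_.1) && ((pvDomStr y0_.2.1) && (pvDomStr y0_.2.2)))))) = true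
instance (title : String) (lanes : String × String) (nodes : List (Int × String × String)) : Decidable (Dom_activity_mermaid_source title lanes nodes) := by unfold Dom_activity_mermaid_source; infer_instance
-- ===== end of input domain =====

-- B replaces A's per-lane rescans of all nodes (and the 'N<i>' build/int()-reparse/re-index round-trip)
-- with one bucketing pass over nodes that formats each line once and groups it by lane. Equal return value; no side effects.

-- ===== PORT A =====
-- module-level COMMON_CLASSES (shared verbatim by Source A and Source B)
def pvCommonClasses : String := "\nclassDef user fill:#dbeafe,stroke:#60a5fa,color:#0f172a,stroke-width:1.5px;\nclassDef service fill:#ccfbf1,stroke:#14b8a6,color:#0f172a,stroke-width:1.5px;\nclassDef data fill:#dcfce7,stroke:#22c55e,color:#0f172a,stroke-width:1.5px;\nclassDef ai fill:#fef3c7,stroke:#f59e0b,color:#0f172a,stroke-width:1.5px;\nclassDef infra fill:#e0e7ff,stroke:#818cf8,color:#0f172a,stroke-width:1.5px;\nclassDef external fill:#ffedd5,stroke:#fb923c,color:#0f172a,stroke-width:1.5px;\nclassDef risk fill:#fee2e2,stroke:#ef4444,color:#0f172a,stroke-width:1.5px;\nclassDef ok fill:#bbf7d0,stroke:#22c55e,color:#0f172a,stroke-width:1.5px;\nclassDef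 pattern fill:#f5d0fe,stroke:#d946ef,color:#0f172a,stroke-width:1.5px;\nclassDef security fill:#dbeafe,stroke:#2563eb,color:#0f172a,stroke-width:1.5px;\n"

-- with_classes (identical module-level helper in Source A and Source B)
def pvWithClasses (source : List Char) : List Char :=
  PySem.Chars.strip source ++ ['\n'] ++ PySem.Chars.strip pvCommonClasses.toList ++ ['\n']

-- hand port of int(s): exact on the nonempty decimal-digit strings it is applied to here
-- (A only calls it on node_id[1:] where node_id = "N" + str(i); PySem.Int.ofStr? agrees there
--  but its parser internals are private, so the digit fold is used and proved exact below).
def pvAtoi (cs : List Char) : Int := (cs.foldl (fun a c => 10 * a + (c.toNat - 48)) 0 : Nat)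

def pvClassForKind : PySem.Dict String String :=
  PySem.Dict.ofList [("start", "user"), ("end", "ok"), ("diamond", "infra"), ("rect", "service")]

def activity_mermaid_source (title : String) (lanes : String × String) (nodes : List (Int × String × String)) : String :=
  let lines : List (List Char) := ["flowchart LR".toList]
  let lines := (PySem.List.enumerate [lanes.1, lanes.2]).foldl (fun lines p =>
    let laneIndex := p.1
    let laneName := p.2
    let nodeIds : List (List Char) :=
      ((PySem.List.enumerate nodes).filter (fun q => q.2.1 == laneIndex)).map
        (fun q => 'N' :: PySem.Int.toChars q.1)
    let lines := lines ++ ["  subgraph L".toList ++ PySem.Int.toChars laneIndex ++ "[\"".toList ++ laneName.toList ++ "\"]".toList]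
    let lines := lines ++ ["    direction TB".toList]
    let lines := nodeIds.foldl (fun lines nodeId =>
      let idx : Int := pvAtoi (PySem.Chars.slice nodeId (some 1) none)   -- idx = int(node_id[1:])
      let node := PySem.List.pyGetD nodes idx (0, "", "")               -- nodes[idx]; in range by construction
      let kind := node.2.1
      let label := node.2.2
      let css := pvClassForKind.getD kind "service"
      if kind == "start" || kind == "end" then
        lines ++ ["    ".toList ++ nodeId ++ "([\"".toList ++ label.toList ++ "\"]):::".toList ++ css.toList]
      else if kind == "diamond" then
        lines ++ ["    ".toList ++ nodeId ++ "{\"".toList ++ label.toList ++ "\"}:::".toList ++ css.toList]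
      else
        lines ++ ["    ".toList ++ nodeId ++ "[\"".toList ++ label.toList ++ "\"]:::".toList ++ css.toList]) lines
    lines ++ ["  end".toList]) lines
  let lines := (PySem.List.pyRange 0 (PySem.List.len nodes - 1) 1).foldl (fun lines idx =>
    lines ++ ["  N".toList ++ PySem.Int.toChars idx ++ " --> N".toList ++ PySem.Int.toChars (idx + 1)]) lines
  String.ofList (pvWithClasses (PySem.Chars.join ['\n'] lines))

-- ===== PORT B =====
def pvShapeForKind : PySem.Dict String (String × String) :=
  PySem.Dict.ofList [("start", ("([\"", "\"]):::user")), ("end", ("([\"", "\"]):::ok")),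
                     ("diamond", ("{\"", "\"}:::infra")), ("rect", ("[\"", "\"]:::service"))]

def activity_mermaid_source_alt (title : String) (lanes : String × String) (nodes : List (Int × String × String)) : String :=
  let buckets : PySem.Dict Int (List (List Char)) :=
    (PySem.List.enumerate nodes).foldl (fun d p =>
      let pp := pvShapeForKind.getD p.2.2.1 ("[\"", "\"]:::service")
      d.modify p.2.1 [] (· ++ ["    N".toList ++ PySem.Int.toChars p.1 ++ pp.1.toList ++ p.2.2.2.toList ++ pp.2.toList]))
      PySem.Dict.empty
  let parts : List (List Char) := ["flowchart LR".toList]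
  let parts := (PySem.List.enumerate [lanes.1, lanes.2]).foldl (fun parts q =>
    parts
      ++ ["  subgraph L".toList ++ PySem.Int.toChars q.1 ++ "[\"".toList ++ q.2.toList ++ "\"]".toList,
          "    direction TB".toList]
      ++ buckets.getD q.1 []
      ++ ["  end".toList]) parts
  let parts := parts ++ (PySem.List.pyRange 0 (PySem.List.len nodes - 1) 1).map (fun j =>
    "  N".toList ++ PySem.Int.toChars j ++ " --> N".toList ++ PySem.Int.toChars (j + 1))
  String.ofList (pvWithClasses (PySem.Chars.join ['\n'] parts))

-- ===== PRECONDITION & SPEC =====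
def Spec_activity_mermaid_source (title : String) (lanes : String × String) (nodes : List (Int × String × String)) (out : String) : Prop := out = activity_mermaid_source_alt title lanes nodes
instance (title : String) (lanes : String × String) (nodes : List (Int × String × String)) (out : String) : Decidable (Spec_activity_mermaid_source title lanes nodes out) := by unfold Spec_activity_mermaid_source; infer_instance

-- ===== CLAIM (what is proved, stated in full; the proofs are below) =====
def Claim_equal_activity_mermaid_source : Prop := ∀ (title : String) (lanes : String × String) (nodes : List (Int × String × String)), Dom_activity_mermaid_source title lanes nodes → Spec_activity_mermaid_source title lanes nodes (activity_mermaid_source title lanes nodes)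

-- ===== LEMMAS AND PROOFS =====

def pvDigitsOf (n : Nat) : List Char :=
  if h : n < 10 then [Nat.digitChar n]
  else pvDigitsOf (n / 10) ++ [Nat.digitChar (n % 10)]
decreasing_by exact Nat.div_lt_self (by omega) (by omega)

theorem pv_toDigitsCore_eq (fuel : Nat) : ∀ (n : Nat) (ds : List Char), 0 < fuel → n < 10 ^ fuel →
    Nat.toDigitsCore 10 fuel n ds = pvDigitsOf n ++ ds := by
  induction fuel with
  | zero => intro n ds h; omega
  | succ f ih =>
    intro n ds _ hn
    rw [Nat.toDigitsCore]
    by_cases h10 : n / 10 = 0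
    · have hlt : n < 10 := by omega
      simp [h10, pvDigitsOf, hlt, Nat.mod_eq_of_lt hlt]
    · have hf : 0 < f := by
        rcases Nat.eq_zero_or_pos f with h | h
        · subst h; simp at hn; omega
        · exact h
      have hlt : ¬ n < 10 := by omega
      simp only [if_neg h10]
      rw [ih (n / 10) _ hf (Nat.div_lt_of_lt_mul (by rw [← Nat.pow_succ'] ; exact hn))]
      conv_rhs => rw [pvDigitsOf]
      simp [hlt]

theorem pv_atoi_digitsOf (n : Nat) : ∀ (a : Nat),
    (pvDigitsOf n).foldl (fun a c => 10 * a + (c.toNat - 48)) a = a * 10 ^ (pvDigitsOf n).length + n := by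
  induction n using Nat.strong_induction_on with
  | _ n ih =>
    intro a
    by_cases h : n < 10
    · rw [pvDigitsOf]
      have hd : (Nat.digitChar n).toNat - 48 = n := by interval_cases n <;> decide
      simp [h, hd]
      ring
    · rw [pvDigitsOf]
      simp only [dif_neg h, List.foldl_append, List.length_append]
      rw [ih (n / 10) (Nat.div_lt_self (by omega) (by omega)) a]
      have hd : (Nat.digitChar (n % 10)).toNat - 48 = n % 10 := by
        have hm : n % 10 < 10 := Nat.mod_lt _ (by omega)
        set m := n % 10 with hmm
        interval_cases m <;> decide
      simp [List.foldl, hd, pow_succ]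
      have h2 : 10 * (n / 10) + n % 10 = n := Nat.div_add_mod n 10
      have h3 : 10 * (a * 10 ^ (pvDigitsOf (n / 10)).length + n / 10) + n % 10
           = a * (10 ^ (pvDigitsOf (n / 10)).length * 10) + (10 * (n / 10) + n % 10) := by ring
      rw [h3, h2]

theorem pv_atoi_toDigits (n : Nat) : pvAtoi (Nat.toDigits 10 n) = (n : Int) := by
  rw [Nat.toDigits, pv_toDigitsCore_eq (n+1) n [] (by omega) (by
    calc n < 10 ^ n := Nat.lt_pow_self (by omega)
    _ ≤ 10 ^ (n+1) := Nat.pow_le_pow_right (by omega) (by omega))]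
  unfold pvAtoi
  rw [List.append_nil, pv_atoi_digitsOf n 0]
  simp


theorem pv_atoi_nodeId (i : Int) (h : 0 ≤ i) :
    pvAtoi (PySem.Chars.slice ('N' :: PySem.Int.toChars i) (some 1) none) = i := by
  have hs : PySem.Chars.slice ('N' :: PySem.Int.toChars i) (some 1) none = PySem.Int.toChars i := by
    simp [PySem.Chars.slice_eq_listSlice, PySem.List.slice_from_one]
  rw [hs]
  unfold PySem.Int.toChars
  rw [if_neg (by omega), pv_atoi_toDigits]
  simp [Int.toNat_of_nonneg h]


-- A's inner-loop line for one node id (proof helper naming the fold body's result)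
def pvLineA (nodes : List (Int × String × String)) (nodeId : List Char) : List Char :=
  let idx : Int := pvAtoi (PySem.Chars.slice nodeId (some 1) none)
  let node := PySem.List.pyGetD nodes idx (0, "", "")
  let kind := node.2.1
  let label := node.2.2
  let css := pvClassForKind.getD kind "service"
  if kind == "start" || kind == "end" then
    "    ".toList ++ nodeId ++ "([\"".toList ++ label.toList ++ "\"]):::".toList ++ css.toList
  else if kind == "diamond" then
    "    ".toList ++ nodeId ++ "{\"".toList ++ label.toList ++ "\"}:::".toList ++ css.toList
  else
    "    ".toList ++ nodeId ++ "[\"".toList ++ label.toList ++ "\"]:::".toList ++ css.toList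

-- B's formatted line for one enumerated node (proof helper)
def pvLineB (p : Int × (Int × String × String)) : List Char :=
  let pp := pvShapeForKind.getD p.2.2.1 ("[\"", "\"]:::service")
  "    N".toList ++ PySem.Int.toChars p.1 ++ pp.1.toList ++ p.2.2.2.toList ++ pp.2.toList

theorem pv_getD_classForKind_default (k : String) (h1 : k ≠ "start") (h2 : k ≠ "end")
    (h3 : k ≠ "diamond") (h4 : k ≠ "rect") : pvClassForKind.getD k "service" = "service" := by
  apply PySem.Dict.getD_of_not_contains
  simp [pvClassForKind, PySem.Dict.ofList, PySem.Dict.update, PySem.Dict.contains_insert, h1, h2, h3, h4]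

theorem pv_getD_shapeForKind_default (k : String) (h1 : k ≠ "start") (h2 : k ≠ "end")
    (h3 : k ≠ "diamond") (h4 : k ≠ "rect") :
    pvShapeForKind.getD k ("[\"", "\"]:::service") = ("[\"", "\"]:::service") := by
  apply PySem.Dict.getD_of_not_contains
  simp [pvShapeForKind, PySem.Dict.ofList, PySem.Dict.update, PySem.Dict.contains_insert, h1, h2, h3, h4]

theorem pv_nodeLine (nodes : List (Int × String × String)) (k : Nat) (hk : k < nodes.length) :
    pvLineA nodes ('N' :: PySem.Int.toChars (k : Int)) = pvLineB ((k : Int), nodes[k]) := by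
  simp only [pvLineA, pvLineB]
  rw [pv_atoi_nodeId _ (by positivity), PySem.List.pyGetD_natCast, List.getD_eq_getElem _ _ hk]
  by_cases h1 : nodes[k].2.1 = "start"
  · simp only [h1]; simp only [List.append_assoc]; rfl
  by_cases h2 : nodes[k].2.1 = "end"
  · simp only [h2]; simp only [List.append_assoc]; rfl
  by_cases h3 : nodes[k].2.1 = "diamond"
  · simp only [h3]; simp only [List.append_assoc]; rfl
  by_cases h4 : nodes[k].2.1 = "rect"
  · simp only [h4]; simp only [List.append_assoc]; rfl
  · rw [pv_getD_classForKind_default _ h1 h2 h3 h4, pv_getD_shapeForKind_default _ h1 h2 h3 h4]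
    simp only [beq_iff_eq, h1, h2, h3, if_false, Bool.or_eq_true, or_self]
    simp only [List.append_assoc]; rfl

theorem pv_foldA (nodes : List (Int × String × String)) (nodeIds : List (List Char)) (lines : List (List Char)) :
    nodeIds.foldl (fun lines nodeId =>
      let idx : Int := pvAtoi (PySem.Chars.slice nodeId (some 1) none)
      let node := PySem.List.pyGetD nodes idx (0, "", "")
      let kind := node.2.1
      let label := node.2.2
      let css := pvClassForKind.getD kind "service"
      if kind == "start" || kind == "end" then
        lines ++ ["    ".toList ++ nodeId ++ "([\"".toList ++ label.toList ++ "\"]):::".toList ++ css.toList]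
      else if kind == "diamond" then
        lines ++ ["    ".toList ++ nodeId ++ "{\"".toList ++ label.toList ++ "\"}:::".toList ++ css.toList]
      else
        lines ++ ["    ".toList ++ nodeId ++ "[\"".toList ++ label.toList ++ "\"]:::".toList ++ css.toList]) lines
    = lines ++ nodeIds.map (pvLineA nodes) := by
  have hb : (fun (lines : List (List Char)) (nodeId : List Char) =>
      let idx : Int := pvAtoi (PySem.Chars.slice nodeId (some 1) none)
      let node := PySem.List.pyGetD nodes idx (0, "", "")
      let kind := node.2.1
      let label := node.2.2
      let css := pvClassForKind.getD kind "service"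
      if kind == "start" || kind == "end" then
        lines ++ ["    ".toList ++ nodeId ++ "([\"".toList ++ label.toList ++ "\"]):::".toList ++ css.toList]
      else if kind == "diamond" then
        lines ++ ["    ".toList ++ nodeId ++ "{\"".toList ++ label.toList ++ "\"}:::".toList ++ css.toList]
      else
        lines ++ ["    ".toList ++ nodeId ++ "[\"".toList ++ label.toList ++ "\"]:::".toList ++ css.toList])
      = fun lines nodeId => lines ++ [pvLineA nodes nodeId] := by
    funext lines nodeId
    simp only [pvLineA]
    split_ifs <;> rfl
  rw [hb, PySem.List.foldl_append_singleton_eq_map]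

theorem pv_foldl_modify_key_val {κ β γ : Type} [BEq κ] [LawfulBEq κ] (l : List γ)
    (key : γ → κ) (val : γ → β) (c : κ) :
    (l.foldl (fun d p => d.modify (key p) [] (· ++ [val p])) PySem.Dict.empty).getD c []
      = (l.filter (fun p => key p == c)).map val := by
  rw [show List.foldl (fun d p => d.modify (key p) [] fun x => x ++ [val p]) PySem.Dict.empty l
        = List.foldl (fun (d : PySem.Dict κ (List β)) q => d.modify q.1 [] fun x => x ++ [q.2])
            PySem.Dict.empty (l.map fun p => (key p, val p)) from
      (List.foldl_map (f := fun p => (key p, val p))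
        (g := fun (d : PySem.Dict κ (List β)) q => d.modify q.1 [] fun x => x ++ [q.2])
        (l := l) (init := PySem.Dict.empty)).symm]
  rw [PySem.Dict.getD_foldl_modify_append]
  simp [List.filter_map, List.map_map, Function.comp_def]

theorem pv_buckets_getD (nodes : List (Int × String × String)) (l : Int) :
    ((PySem.List.enumerate nodes).foldl (fun d p =>
        let pp := pvShapeForKind.getD p.2.2.1 ("[\"", "\"]:::service")
        d.modify p.2.1 [] (· ++ ["    N".toList ++ PySem.Int.toChars p.1 ++ pp.1.toList ++ p.2.2.2.toList ++ pp.2.toList]))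
        PySem.Dict.empty).getD l []
      = ((PySem.List.enumerate nodes).filter (fun p => p.2.1 == l)).map pvLineB := by
  exact pv_foldl_modify_key_val (PySem.List.enumerate nodes) (fun p => p.2.1) pvLineB l

theorem pv_lane_block (nodes : List (Int × String × String)) (l : Int) :
    (((PySem.List.enumerate nodes).filter (fun q => q.2.1 == l)).map
        (fun q => 'N' :: PySem.Int.toChars q.1)).map (pvLineA nodes)
      = ((PySem.List.enumerate nodes).filter (fun q => q.2.1 == l)).map pvLineB := by
  rw [List.map_map]
  apply List.map_congr_left
  intro p hp
  have hp' := List.mem_of_mem_filter hp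
  rw [PySem.List.mem_enumerate_iff] at hp'
  obtain ⟨k, hk, rfl⟩ := hp'
  simpa using pv_nodeLine nodes k hk

-- ===== VERDICT (by name: the statement is the Claim_ definition above) =====
theorem activity_mermaid_source_spec : Claim_equal_activity_mermaid_source := by
  intro title lanes nodes _
  show _ = _
  simp only [activity_mermaid_source, activity_mermaid_source_alt]
  simp only [PySem.List.enumerate_cons, PySem.List.enumerate_nil, List.foldl_cons, List.foldl_nil]
  rw [pv_foldA, pv_foldA, pv_lane_block, pv_lane_block, pv_buckets_getD, pv_buckets_getD,
      PySem.List.foldl_append_singleton_eq_map]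
  norm_num
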